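-- pv_equiv track=rewrite | github.com/rohankatyal29/IR29 | indexerTwitter.py | filter_ascii
-- ===== SOURCE A (Python) =====
-- def filter_ascii(s):
--     if all(ord(c) < 128 for c in s) == True:
--       string = s
--       for c in s:
--         # only a-z and A-Z for now
--         if (ord(c) >= 65 and ord(c) <= 90) or (ord(c) >= 97 and ord(c) <= 122):
--           continue
--         else:
--           string = string.replace(c, "")
--       return string
--     return ''
-- ===== SOURCE B (Python) =====
-- def filter_ascii(s):
--     if not all(ord(c) < 128 for c in s):
--         return ''
--     table = {c: None for c in range(128)
--              if not (65 <= c <= 90 or 97 <= c <= 122)}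
--     return s.translate(table)
-- ===== Notes on version B (the rewrite author's own statement) =====
-- stated objective: faster
-- what changed: Replaced the per-character branch loop with repeated full-string str.replace calls by building a translation table (non-letter codepoints -> None) once and doing a single table-driven s.translate pass.
import Mathlib
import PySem

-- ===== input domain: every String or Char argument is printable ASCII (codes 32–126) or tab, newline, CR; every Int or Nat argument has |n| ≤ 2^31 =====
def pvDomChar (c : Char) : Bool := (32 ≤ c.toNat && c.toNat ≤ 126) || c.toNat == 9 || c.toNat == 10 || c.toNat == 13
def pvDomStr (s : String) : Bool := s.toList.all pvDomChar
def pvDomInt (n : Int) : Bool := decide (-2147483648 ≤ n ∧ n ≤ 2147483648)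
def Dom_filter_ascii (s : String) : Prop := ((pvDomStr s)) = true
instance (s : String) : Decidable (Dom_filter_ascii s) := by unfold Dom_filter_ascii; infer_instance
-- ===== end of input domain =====

-- B replaces A's per-character loop of full-string .replace calls with one translation table built once and a single translate pass (faster).

-- ===== PORT A =====
def filter_ascii (s : String) : String :=
  if s.toList.all (fun c => decide (c.toNat < 128)) then
    s.toList.foldl (fun string c =>
      if (65 ≤ c.toNat ∧ c.toNat ≤ 90) ∨ (97 ≤ c.toNat ∧ c.toNat ≤ 122) then string
      else PySem.Str.replace string (String.ofList [c]) "") s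
  else ""

-- ===== PORT B =====
-- the translation table: each non-letter codepoint of range(128) maps to None
def pvTable_filter_ascii : PySem.Dict Int (Option String) :=
  (PySem.List.pyRange 0 128 1).foldl (fun d i =>
    if ¬ ((65 ≤ i ∧ i ≤ 90) ∨ (97 ≤ i ∧ i ≤ 122)) then PySem.Dict.insert d i none else d)
    PySem.Dict.empty

-- hand port of str.translate: every value stored in the table is None, so translate
-- deletes exactly the characters whose codepoint is a key of the table (exact here)
def filter_ascii_alt (s : String) : String :=
  if ¬ s.toList.all (fun c => decide (c.toNat < 128)) then ""
  else String.ofList (s.toList.filter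
    (fun c => (PySem.Dict.get? pvTable_filter_ascii (Int.ofNat c.toNat)).isNone))

-- ===== PRECONDITION & SPEC =====
def Spec_filter_ascii (s : String) (out : String) : Prop := out = filter_ascii_alt s
instance (s : String) (out : String) : Decidable (Spec_filter_ascii s out) := by unfold Spec_filter_ascii; infer_instance

-- ===== CLAIM (what is proved, stated in full; the proofs are below) =====
def Claim_equal_filter_ascii : Prop := ∀ (s : String), Dom_filter_ascii s → Spec_filter_ascii s (filter_ascii s)

-- ===== LEMMAS AND PROOFS =====

-- the letter test, as a Bool (proof-side abbreviation)
def isLb (c : Char) : Bool := decide ((65 ≤ c.toNat ∧ c.toNat ≤ 90) ∨ (97 ≤ c.toNat ∧ c.toNat ≤ 122))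

-- replacing a single character with the empty string is filtering it out
theorem replace_go_single (c : Char) : ∀ (l acc : List Char) (fuel : Nat), l.length ≤ fuel →
    PySem.Chars.replace.go [c] [] fuel l acc = acc.reverse ++ l.filter (· != c) := by
  intro l
  induction l with
  | nil =>
      intro acc fuel _
      cases fuel <;> simp [PySem.Chars.replace.go]
  | cons d t ih =>
      intro acc fuel hf
      cases fuel with
      | zero => simp at hf
      | succ fuel =>
        simp only [List.length_cons, Nat.succ_le_succ_iff] at hf
        by_cases hdc : c = d
        · subst hdc
          simp [PySem.Chars.replace.go, List.isPrefixOf, ih _ _ hf]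
        · have : List.isPrefixOf [c] (d :: t) = false := by
            simp [List.isPrefixOf]; exact fun h => absurd h.symm (Ne.symm hdc)
          simp [PySem.Chars.replace.go, this, ih _ _ hf, bne, Ne.symm hdc]

theorem replace_single (l : List Char) (c : Char) :
    PySem.Chars.replace l [c] [] = l.filter (· != c) := by
  simp [PySem.Chars.replace]
  exact replace_go_single c l [] l.length le_rfl

-- A's loop over a String accumulator, moved to the list side
theorem foldA_toList (l : List Char) : ∀ (st : String),
    (l.foldl (fun string c =>
      if (65 ≤ c.toNat ∧ c.toNat ≤ 90) ∨ (97 ≤ c.toNat ∧ c.toNat ≤ 122) then string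
      else PySem.Str.replace string (String.ofList [c]) "") st).toList
    = l.foldl (fun st c =>
      if (65 ≤ c.toNat ∧ c.toNat ≤ 90) ∨ (97 ≤ c.toNat ∧ c.toNat ≤ 122) then st
      else st.filter (· != c)) st.toList := by
  induction l with
  | nil => intro st; rfl
  | cons c t ih =>
      intro st
      by_cases h : (65 ≤ c.toNat ∧ c.toNat ≤ 90) ∨ (97 ≤ c.toNat ∧ c.toNat ≤ 122)
      · simp [h, ih]
      · simp [h, ih, PySem.Str.toList_replace, replace_single]

-- invariant of A's loop: a character survives iff it is a letter or never occurred as a non-letter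
theorem foldA_filter (l : List Char) : ∀ (st : List Char),
    l.foldl (fun st c =>
      if (65 ≤ c.toNat ∧ c.toNat ≤ 90) ∨ (97 ≤ c.toNat ∧ c.toNat ≤ 122) then st
      else st.filter (· != c)) st
    = st.filter (fun x => isLb x || !(l.any (fun y => !isLb y && y == x))) := by
  induction l with
  | nil => intro st; simp
  | cons c t ih =>
      intro st
      cases hLc : isLb c with
      | true =>
        have hc : (65 ≤ c.toNat ∧ c.toNat ≤ 90) ∨ (97 ≤ c.toNat ∧ c.toNat ≤ 122) :=
          of_decide_eq_true hLc
        rw [List.foldl_cons, if_pos hc, ih]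
        apply List.filter_congr
        intro x _
        simp only [List.any_cons, hLc, Bool.not_true, Bool.false_and, Bool.false_or]
      | false =>
        have hc : ¬ ((65 ≤ c.toNat ∧ c.toNat ≤ 90) ∨ (97 ≤ c.toNat ∧ c.toNat ≤ 122)) :=
          of_decide_eq_false hLc
        rw [List.foldl_cons, if_neg hc, ih, List.filter_filter]
        apply List.filter_congr
        intro x _
        cases hxc : (x == c) with
        | true =>
          have hx : x = c := beq_iff_eq.mp hxc
          subst hx
          simp [hLc]
        | false =>
          have hcx : (c == x) = false := by
            rw [beq_eq_false_iff_ne]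
            exact fun h => (beq_eq_false_iff_ne.mp hxc) h.symm
          simp only [List.any_cons, hLc, Bool.not_false, Bool.true_and, hcx,
            Bool.not_or, bne, hxc, Bool.and_true]

-- the table lookup agrees with the letter test on codepoints below 128
set_option maxRecDepth 4000 in
theorem table_lookup : ∀ n : Nat, n < 128 →
    (PySem.Dict.get? pvTable_filter_ascii (Int.ofNat n)).isNone
    = decide ((65 ≤ n ∧ n ≤ 90) ∨ (97 ≤ n ∧ n ≤ 122)) := by
  decide

-- ===== VERDICT (by name: the statement is the Claim_ definition above) =====
theorem filter_ascii_spec : Claim_equal_filter_ascii := by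
  intro s _
  unfold Spec_filter_ascii filter_ascii filter_ascii_alt
  by_cases hg : (s.toList.all (fun c => decide (c.toNat < 128))) = true
  · rw [if_pos hg, if_neg (by simp [hg])]
    rw [← String.ofList_toList
        (s := s.toList.foldl (fun string c =>
          if (65 ≤ c.toNat ∧ c.toNat ≤ 90) ∨ (97 ≤ c.toNat ∧ c.toNat ≤ 122) then string
          else PySem.Str.replace string (String.ofList [c]) "") s)]
    congr 1
    rw [foldA_toList, foldA_filter]
    apply List.filter_congr
    intro x hx
    have hx128 : x.toNat < 128 := by
      have := List.all_eq_true.mp hg x hx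
      simpa using this
    rw [table_lookup x.toNat hx128]
    show (isLb x || !(s.toList.any (fun y => !isLb y && y == x))) = isLb x
    cases hLx : isLb x with
    | true => rfl
    | false =>
      have hany : (s.toList.any (fun y => !isLb y && y == x)) = true :=
        List.any_eq_true.mpr ⟨x, hx, by simp [hLx]⟩
      simp [hany]
  · rw [if_neg hg, if_pos (by simp [hg])]
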